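-- pv_equiv track=rewrite | github.com/mansii21-star/multi-agent-interview | agents/tech_agent.py | ask_tech_question
-- ===== SOURCE A (Python) =====
-- def ask_tech_question(skills):
--     skills = [s.lower() for s in skills]
--
--     if "python" in skills:
--         return "Explain a Python project you have worked on."
--     elif "sql" in skills:
--         return "What is JOIN in SQL and why is it used?"
--     elif "java" in skills:
--         return "Explain OOP concepts in Java."
--     elif "ml" in skills:
--         return "What is overfitting in Machine Learning?"
--     else:
--         return "Explain any technical concept you are comfortable with."
-- ===== SOURCE B (Python) =====
-- _PRIO = {"python": 0, "sql": 1, "java": 2, "ml": 3}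
-- _QUESTIONS = [
--     "Explain a Python project you have worked on.",
--     "What is JOIN in SQL and why is it used?",
--     "Explain OOP concepts in Java.",
--     "What is overfitting in Machine Learning?",
--     "Explain any technical concept you are comfortable with.",
-- ]
--
-- def ask_tech_question(skills):
--     best = 4
--     for s in skills:
--         best = min(best, _PRIO.get(s.lower(), 4))
--     return _QUESTIONS[best]
-- ===== Notes on version B (the rewrite author's own statement) =====
-- stated objective: alternative
-- what changed: Replaces A's per-keyword membership scans (if/elif first-match cascade) with a single min-reduction pass that folds each skill to a priority rank and then indexes the question table by the minimum rank found.
import Mathlib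
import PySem

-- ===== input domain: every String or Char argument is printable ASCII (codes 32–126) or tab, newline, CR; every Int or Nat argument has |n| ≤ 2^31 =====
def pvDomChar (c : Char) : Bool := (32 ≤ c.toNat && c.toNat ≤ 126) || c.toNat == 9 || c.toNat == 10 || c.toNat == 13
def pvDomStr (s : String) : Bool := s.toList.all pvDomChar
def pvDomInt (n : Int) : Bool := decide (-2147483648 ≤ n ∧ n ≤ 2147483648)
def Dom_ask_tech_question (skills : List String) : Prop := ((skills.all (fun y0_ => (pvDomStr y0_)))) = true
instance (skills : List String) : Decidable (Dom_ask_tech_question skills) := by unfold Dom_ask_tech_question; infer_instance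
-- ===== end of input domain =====

-- B replaces A's if/elif membership cascade with a single min-reduction pass: each skill maps to a priority rank and the table is indexed by the minimum rank (alternative decomposition; return value only).


-- ===== PORT A =====
def ask_tech_question (skills : List String) : String :=
  let skills := skills.map PySem.Str.lower
  if skills.contains "python" then "Explain a Python project you have worked on."
  else if skills.contains "sql" then "What is JOIN in SQL and why is it used?"
  else if skills.contains "java" then "Explain OOP concepts in Java."
  else if skills.contains "ml" then "What is overfitting in Machine Learning?"
  else "Explain any technical concept you are comfortable with."

-- ===== PORT B =====
-- _PRIO.get(t, 4)
def techPrio (t : String) : Nat :=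
  (PySem.Dict.get? (PySem.Dict.ofList [("python", 0), ("sql", 1), ("java", 2), ("ml", 3)]) t).getD 4

def techQuestions : List String :=
  ["Explain a Python project you have worked on.",
   "What is JOIN in SQL and why is it used?",
   "Explain OOP concepts in Java.",
   "What is overfitting in Machine Learning?",
   "Explain any technical concept you are comfortable with."]

def ask_tech_question_alt (skills : List String) : String :=
  let best := skills.foldl (fun acc s => min acc (techPrio (PySem.Str.lower s))) 4
  techQuestions.getD best ""

-- ===== PRECONDITION & SPEC =====
def Spec_ask_tech_question (skills : List String) (out : String) : Prop := out = ask_tech_question_alt skills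
instance (skills : List String) (out : String) : Decidable (Spec_ask_tech_question skills out) := by unfold Spec_ask_tech_question; infer_instance

-- ===== CLAIM (what is proved, stated in full; the proofs are below) =====
def Claim_equal_ask_tech_question : Prop := ∀ (skills : List String), Dom_ask_tech_question skills → Spec_ask_tech_question skills (ask_tech_question skills)

-- ===== LEMMAS AND PROOFS =====

def techMin (skills : List String) : Nat :=
  skills.foldl (fun acc s => min acc (techPrio (PySem.Str.lower s))) 4

lemma techPrio_eq (t : String) :
    techPrio t = if t = "python" then 0 else if t = "sql" then 1
      else if t = "java" then 2 else if t = "ml" then 3 else 4 := by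
  have hd : PySem.Dict.ofList [("python", (0:Nat)), ("sql", 1), ("java", 2), ("ml", 3)]
      = PySem.Dict.mk [("python", 0), ("sql", 1), ("java", 2), ("ml", 3)] := by decide
  unfold techPrio
  rw [hd]
  by_cases h1 : t = "python"
  · subst h1; decide
  by_cases h2 : t = "sql"
  · subst h2; decide
  by_cases h3 : t = "java"
  · subst h3; decide
  by_cases h4 : t = "ml"
  · subst h4; decide
  rw [if_neg h1, if_neg h2, if_neg h3, if_neg h4]
  simp [PySem.Dict.get?, Ne.symm h1, Ne.symm h2, Ne.symm h3, Ne.symm h4]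

lemma techPrio_le (t : String) : techPrio t ≤ 4 := by
  rw [techPrio_eq]; split_ifs <;> omega

lemma techMin_acc (skills : List String) (b : Nat) (hb : b ≤ 4) :
    skills.foldl (fun acc s => min acc (techPrio (PySem.Str.lower s))) b
      = min b (techMin skills) := by
  induction skills generalizing b with
  | nil => simp [techMin]; omega
  | cons s l ih =>
      have hp := techPrio_le (PySem.Str.lower s)
      simp only [techMin, List.foldl_cons] at *
      rw [ih _ (by omega), ih (min 4 _) (by omega)]
      omega

lemma techMin_cons (s : String) (l : List String) :
    techMin (s :: l) = min (techPrio (PySem.Str.lower s)) (techMin l) := by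
  have hp := techPrio_le (PySem.Str.lower s)
  simp only [techMin, List.foldl_cons]
  rw [techMin_acc _ _ (by omega)]
  have h4 : min 4 (techPrio (PySem.Str.lower s)) = techPrio (PySem.Str.lower s) := by omega
  rw [h4]
  rfl

lemma techMin_le_of_mem (skills : List String) (s : String) (h : s ∈ skills) :
    techMin skills ≤ techPrio (PySem.Str.lower s) := by
  induction skills with
  | nil => cases h
  | cons a l ih =>
      rw [techMin_cons]
      rcases List.mem_cons.mp h with h | h
      · subst h; omega
      · have := ih h; omega

lemma techMin_ge (skills : List String) (n : Nat) (hn : n ≤ 4)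
    (h : ∀ s ∈ skills, n ≤ techPrio (PySem.Str.lower s)) : n ≤ techMin skills := by
  induction skills with
  | nil => simp [techMin]; omega
  | cons a l ih =>
      rw [techMin_cons]
      have h1 := h a (List.mem_cons_self ..)
      have h2 := ih (fun s hs => h s (List.mem_cons_of_mem _ hs))
      omega

lemma contains_lower_iff (skills : List String) (k : String) :
    (skills.map PySem.Str.lower).contains k = true ↔ ∃ s ∈ skills, PySem.Str.lower s = k := by
  simp

-- ===== VERDICT (by name: the statement is the Claim_ definition above) =====
theorem ask_tech_question_spec : Claim_equal_ask_tech_question := by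
  intro skills _
  unfold Spec_ask_tech_question ask_tech_question ask_tech_question_alt
  dsimp only
  rw [show (skills.foldl (fun acc s => min acc (techPrio (PySem.Str.lower s))) 4)
      = techMin skills from rfl]
  by_cases c1 : (skills.map PySem.Str.lower).contains "python" = true
  · obtain ⟨s, hs, hl⟩ := (contains_lower_iff skills "python").mp c1
    have hle := techMin_le_of_mem skills s hs
    rw [hl] at hle
    have h0 : techPrio "python" = 0 := by decide
    have : techMin skills = 0 := by omega
    rw [if_pos c1, this]
    rfl
  rw [if_neg c1]
  have n1 : ∀ s ∈ skills, PySem.Str.lower s ≠ "python" := by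
    intro s hs he
    exact c1 ((contains_lower_iff skills "python").mpr ⟨s, hs, he⟩)
  by_cases c2 : (skills.map PySem.Str.lower).contains "sql" = true
  · obtain ⟨s, hs, hl⟩ := (contains_lower_iff skills "sql").mp c2
    have hle := techMin_le_of_mem skills s hs
    rw [hl] at hle
    have h1 : techPrio "sql" = 1 := by decide
    have hge : 1 ≤ techMin skills := by
      refine techMin_ge skills 1 (by omega) (fun t ht => ?_)
      rw [techPrio_eq, if_neg (n1 t ht)]
      split_ifs <;> omega
    have : techMin skills = 1 := by omega
    rw [if_pos c2, this]
    rfl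
  rw [if_neg c2]
  have n2 : ∀ s ∈ skills, PySem.Str.lower s ≠ "sql" := by
    intro s hs he
    exact c2 ((contains_lower_iff skills "sql").mpr ⟨s, hs, he⟩)
  by_cases c3 : (skills.map PySem.Str.lower).contains "java" = true
  · obtain ⟨s, hs, hl⟩ := (contains_lower_iff skills "java").mp c3
    have hle := techMin_le_of_mem skills s hs
    rw [hl] at hle
    have h2 : techPrio "java" = 2 := by decide
    have hge : 2 ≤ techMin skills := by
      refine techMin_ge skills 2 (by omega) (fun t ht => ?_)
      rw [techPrio_eq, if_neg (n1 t ht), if_neg (n2 t ht)]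
      split_ifs <;> omega
    have : techMin skills = 2 := by omega
    rw [if_pos c3, this]
    rfl
  rw [if_neg c3]
  have n3 : ∀ s ∈ skills, PySem.Str.lower s ≠ "java" := by
    intro s hs he
    exact c3 ((contains_lower_iff skills "java").mpr ⟨s, hs, he⟩)
  by_cases c4 : (skills.map PySem.Str.lower).contains "ml" = true
  · obtain ⟨s, hs, hl⟩ := (contains_lower_iff skills "ml").mp c4
    have hle := techMin_le_of_mem skills s hs
    rw [hl] at hle
    have h3 : techPrio "ml" = 3 := by decide
    have hge : 3 ≤ techMin skills := by
      refine techMin_ge skills 3 (by omega) (fun t ht => ?_)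
      rw [techPrio_eq, if_neg (n1 t ht), if_neg (n2 t ht), if_neg (n3 t ht)]
      split_ifs <;> omega
    have : techMin skills = 3 := by omega
    rw [if_pos c4, this]
    rfl
  rw [if_neg c4]
  have n4 : ∀ s ∈ skills, PySem.Str.lower s ≠ "ml" := by
    intro s hs he
    exact c4 ((contains_lower_iff skills "ml").mpr ⟨s, hs, he⟩)
  have hge : 4 ≤ techMin skills := by
    refine techMin_ge skills 4 (by omega) (fun t ht => ?_)
    rw [techPrio_eq, if_neg (n1 t ht), if_neg (n2 t ht), if_neg (n3 t ht), if_neg (n4 t ht)]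
  have : techMin skills = 4 := by
    have : techMin skills ≤ 4 := by
      induction skills with
      | nil => simp [techMin]
      | cons a l ih => rw [techMin_cons]; have := techPrio_le (PySem.Str.lower a); omega
    omega
  rw [this]
  rfl
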